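-- pv_equiv track=rewrite | github.com/weibinzh/LLMFlowGo | llmflowgo/core/dag_analyzer.py | _build_predecessors
-- ===== SOURCE A (Python) =====
-- from typing import Dict, List, Any, Tuple, Optional
-- from collections import defaultdict, deque
--
-- def _build_predecessors(successors: Dict[int, List[int]]) -> Dict[int, List[int]]:
--     preds: Dict[int, List[int]] = defaultdict(list)
--     for u, vs in successors.items():
--         for v in vs:
--             preds[v].append(u)
--     nodes = set(successors.keys()) | set(preds.keys())
--     for n in nodes:
--         preds.setdefault(n, [])
--     return {int(k): list(map(int, v)) for k, v in preds.items()}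
-- ===== SOURCE B (Python) =====
-- def _build_predecessors(successors):
--     # Flatten edges once, then build each predecessor list by a per-node scan
--     # over the edge list, keys ordered as: targets (first appearance), then
--     # remaining source nodes.
--     edges = [(u, v) for u, vs in successors.items() for v in vs]
--     order = dict.fromkeys([v for _, v in edges] + list(successors.keys()))
--     return {int(n): [int(u) for u, v in edges if v == n] for n in order}
-- ===== Notes on version B (the rewrite author's own statement) =====
-- stated objective: alternative
-- what changed: A pushes each edge into a defaultdict in one pass then backfills missing nodes with setdefault; B flattens the edges once, computes the key order up front with dict.fromkeys, and builds each predecessor list by a per-target scan over the edge list.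
import Mathlib
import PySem

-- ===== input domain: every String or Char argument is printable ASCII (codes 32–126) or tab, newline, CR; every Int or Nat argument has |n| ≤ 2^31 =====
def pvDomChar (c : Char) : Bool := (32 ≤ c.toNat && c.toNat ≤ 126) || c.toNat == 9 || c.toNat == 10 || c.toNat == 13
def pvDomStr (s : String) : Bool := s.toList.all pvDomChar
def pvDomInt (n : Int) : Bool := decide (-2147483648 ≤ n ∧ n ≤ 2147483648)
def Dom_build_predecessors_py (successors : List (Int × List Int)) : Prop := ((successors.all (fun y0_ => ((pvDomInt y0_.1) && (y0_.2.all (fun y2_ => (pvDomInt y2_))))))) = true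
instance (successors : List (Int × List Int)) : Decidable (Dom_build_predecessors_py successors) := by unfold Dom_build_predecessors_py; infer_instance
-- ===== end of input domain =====

-- B replaces A's edge-push defaultdict pass + setdefault backfill by a flattened edge
-- list, an up-front key order via dict.fromkeys, and a per-target scan (alternative
-- decomposition, not faster).


-- ===== PORT A =====
-- preds = defaultdict(list); for u, vs in successors.items(): for v in vs: preds[v].append(u)
-- nodes = set(successors.keys()) | set(preds.keys()); for n in nodes: preds.setdefault(n, [])
-- return {int(k): list(map(int, v)) for k, v in preds.items()}   (int() is the identity on Int)
-- (a Python set's hash iteration order is unspecified; the port enumerates nodes in insertion order)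
def build_predecessors_py (successors : List (Int × List Int)) : List (Int × List Int) :=
  let preds : PySem.Dict Int (List Int) :=
    successors.foldl
      (fun d p => p.2.foldl (fun d v => d.modify v [] (fun w => w ++ [p.1])) d)
      PySem.Dict.empty
  let nodes : PySem.Set Int :=
    PySem.Set.union (PySem.Set.ofList (successors.map (fun p => p.1)))
      (PySem.Set.ofList preds.keys)
  let preds2 := nodes.foldl (fun d n => d.setdefault n []) preds
  preds2.items.map (fun p => (p.1, p.2.map (fun x => x)))

-- ===== PORT B =====
-- edges = [(u, v) for u, vs in successors.items() for v in vs]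
-- order = dict.fromkeys([v for _, v in edges] + list(successors.keys()))
-- return {int(n): [int(u) for u, v in edges if v == n] for n in order}
def build_predecessors_py_alt (successors : List (Int × List Int)) : List (Int × List Int) :=
  let edges : List (Int × Int) := successors.flatMap (fun p => p.2.map (fun v => (p.1, v)))
  let order : List Int :=
    PySem.List.dedup (edges.map (fun e => e.2) ++ successors.map (fun p => p.1))
  order.map (fun n => (n, (edges.filter (fun e => e.2 == n)).map (fun e => e.1)))

-- ===== PRECONDITION & SPEC =====
def Spec_build_predecessors_py (successors : List (Int × List Int)) (out : List (Int × List Int)) : Prop := out = build_predecessors_py_alt successors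
instance (successors : List (Int × List Int)) (out : List (Int × List Int)) : Decidable (Spec_build_predecessors_py successors out) := by unfold Spec_build_predecessors_py; infer_instance

-- ===== CLAIM (what is proved, stated in full; the proofs are below) =====
def Claim_equal_build_predecessors_py : Prop := ∀ (successors : List (Int × List Int)), Dom_build_predecessors_py successors → Spec_build_predecessors_py successors (build_predecessors_py successors)

-- ===== LEMMAS AND PROOFS =====

-- A's nested loop over (u, vs) pairs is the flat loop over the edge list.
theorem pv_foldl_nested_eq_edges (l : List (Int × List Int)) (d : PySem.Dict Int (List Int)) :
    l.foldl (fun d p => p.2.foldl (fun d v => d.modify v [] (fun w => w ++ [p.1])) d) d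
      = (l.flatMap (fun p => p.2.map (fun v => (p.1, v)))).foldl
          (fun d e => d.modify e.2 [] (fun w => w ++ [e.1])) d := by
  induction l generalizing d with
  | nil => rfl
  | cons p l ih =>
      simp only [List.foldl_cons, List.flatMap_cons, List.foldl_append, List.foldl_map, ih]

theorem pv_add_of_mem {s : PySem.Set Int} {x : Int} (h : x ∈ s) : PySem.Set.add s x = s := by
  simp [PySem.Set.add, PySem.Set.contains, h]

theorem pv_update_of_subset {s : PySem.Set Int} {l : List Int} (h : ∀ x ∈ l, x ∈ s) :
    PySem.Set.update s l = s := by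
  induction l generalizing s with
  | nil => rfl
  | cons x l ih =>
      have hx : PySem.Set.add s x = s := pv_add_of_mem (h x (by simp))
      show PySem.Set.update (PySem.Set.add s x) l = s
      rw [hx]; exact ih (fun y hy => h y (by simp [hy]))

theorem pv_update_add (s t : PySem.Set Int) (x : Int) :
    PySem.Set.update s (PySem.Set.add t x) = PySem.Set.add (PySem.Set.update s t) x := by
  by_cases hx : x ∈ t
  · rw [pv_add_of_mem hx, pv_add_of_mem ((PySem.Set.mem_update s t x).mpr (Or.inr hx))]
  · have : PySem.Set.add t x = t ++ [x] := by
      simp [PySem.Set.add, PySem.Set.contains, hx]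
    rw [this, PySem.Set.update_append]; rfl

theorem pv_update_update (l : List Int) (s t : PySem.Set Int) :
    PySem.Set.update s (PySem.Set.update t l) = PySem.Set.update (PySem.Set.update s t) l := by
  induction l generalizing t with
  | nil => rfl
  | cons x l ih =>
      show PySem.Set.update s (PySem.Set.update (PySem.Set.add t x) l)
            = PySem.Set.update (PySem.Set.update s t) (x :: l)
      rw [ih (PySem.Set.add t x), pv_update_add]
      rfl

theorem pv_update_ofList (s : PySem.Set Int) (l : List Int) :
    PySem.Set.update s (PySem.Set.ofList l) = PySem.Set.update s l := by
  have := pv_update_update l s ([] : PySem.Set Int)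
  simpa [PySem.Set.ofList, PySem.Set.update, PySem.Set.empty] using this

-- the key order of A's final dict equals B's dict.fromkeys order
theorem pv_keys_order (K T : List Int) :
    PySem.Set.update (PySem.Set.ofList T)
        (PySem.Set.union (PySem.Set.ofList K) (PySem.Set.ofList T))
      = PySem.Set.ofList (T ++ K) := by
  have h1 : PySem.Set.union (PySem.Set.ofList K) (PySem.Set.ofList T)
      = PySem.Set.update (PySem.Set.ofList K) (PySem.Set.ofList T) := rfl
  rw [h1, pv_update_update, pv_update_ofList,
    pv_update_of_subset (fun x hx => (PySem.Set.mem_update _ _ x).mpr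
      (Or.inl ((PySem.Set.mem_ofList T x).mpr hx))), pv_update_ofList]
  simp [PySem.Set.ofList, PySem.Set.update, PySem.Set.empty, List.foldl_append]

-- the setdefault backfill loop: keys grow exactly by Set.update …
theorem pv_keys_foldl_setdefault (ns : List Int) (d : PySem.Dict Int (List Int)) :
    (ns.foldl (fun d n => d.setdefault n []) d).keys = PySem.Set.update d.keys ns := by
  induction ns generalizing d with
  | nil => rfl
  | cons n ns ih =>
      show (ns.foldl (fun d n => d.setdefault n []) (d.setdefault n [])).keys
            = PySem.Set.update (PySem.Set.add d.keys n) ns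
      rw [ih]
      congr 1
      by_cases hn : n ∈ d.keys
      · rw [PySem.Dict.keys_setdefault, pv_add_of_mem hn,
          if_pos ((PySem.Dict.contains_iff_mem_keys d n).mpr hn)]
      · have hc : d.contains n = false := by
          by_contra hne
          exact hn ((PySem.Dict.contains_iff_mem_keys d n).mp (by simpa using hne))
        rw [PySem.Dict.keys_setdefault, if_neg (by simp [hc])]
        simp [PySem.Set.add, PySem.Set.contains, hn]

-- … while getD with the [] default never changes
theorem pv_getD_foldl_setdefault (ns : List Int) (d : PySem.Dict Int (List Int)) (c : Int) :
    (ns.foldl (fun d n => d.setdefault n []) d).getD c [] = d.getD c [] := by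
  induction ns generalizing d with
  | nil => rfl
  | cons n ns ih =>
      show (ns.foldl (fun d n => d.setdefault n []) (d.setdefault n [])).getD c []
            = d.getD c []
      rw [ih]
      by_cases hc : d.contains n = true
      · rw [PySem.Dict.setdefault_of_contains d [] hc]
      · have hcf : d.contains n = false := by simpa using hc
        rw [PySem.Dict.setdefault_of_not_contains d [] hcf, PySem.Dict.getD_insert]
        by_cases he : c = n
        · subst he; rw [if_pos rfl, PySem.Dict.getD_of_not_contains d [] hcf]
        · rw [if_neg he]

-- getD of the edge-push loop: the predecessor list of c is the sources of edges into c
theorem pv_getD_edge_fold (E : List (Int × Int)) (c : Int) :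
    (E.foldl (fun d e => d.modify e.2 [] (fun w => w ++ [e.1])) PySem.Dict.empty).getD c []
      = (E.filter (fun e => e.2 == c)).map (fun e => e.1) := by
  have h : E.foldl (fun d e => d.modify e.2 [] (fun w => w ++ [e.1])) PySem.Dict.empty
      = (E.map (fun e => (e.2, e.1))).foldl
          (fun d p => d.modify p.1 [] (fun w => w ++ [p.2])) PySem.Dict.empty := by
    rw [List.foldl_map]
  rw [h, PySem.Dict.getD_foldl_modify_append, PySem.Dict.getD_empty]
  simp [List.filter_map, List.map_map, Function.comp_def]

-- keys of the edge-push loop: the distinct targets, in first-appearance order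
theorem pv_keys_edge_fold (E : List (Int × Int)) :
    (E.foldl (fun d e => d.modify e.2 [] (fun w => w ++ [e.1])) PySem.Dict.empty).keys
      = PySem.Set.ofList (E.map (fun e => e.2)) := by
  rw [PySem.Dict.keys_foldl_modify_key E (fun e => e.2) [] (fun _ e => (fun w => w ++ [e.1]))]
  simp [PySem.Dict.keys_empty, PySem.Set.ofList, PySem.Set.update, PySem.Set.empty]

-- ===== VERDICT (by name: the statement is the Claim_ definition above) =====
theorem build_predecessors_py_spec : Claim_equal_build_predecessors_py := by
  intro successors _
  unfold Spec_build_predecessors_py build_predecessors_py build_predecessors_py_alt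
  simp only []
  set K := successors.map (fun p => p.1) with hK
  set E := successors.flatMap (fun p => p.2.map (fun v => (p.1, v))) with hE
  set T := E.map (fun e => e.2) with hT
  rw [pv_foldl_nested_eq_edges]
  set preds := E.foldl (fun d e => d.modify e.2 [] (fun w => w ++ [e.1])) PySem.Dict.empty
    with hpreds
  have hk : preds.keys = PySem.Set.ofList T := pv_keys_edge_fold E
  have hg : ∀ c, preds.getD c [] = (E.filter (fun e => e.2 == c)).map (fun e => e.1) :=
    fun c => pv_getD_edge_fold E c
  set nodes := PySem.Set.union (PySem.Set.ofList K) (PySem.Set.ofList preds.keys) with hnodes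
  set F := nodes.foldl (fun d n => d.setdefault n []) preds with hF
  have hFkeys : F.keys = PySem.Set.ofList (T ++ K) := by
    have hnn : nodes = PySem.Set.union (PySem.Set.ofList K) (PySem.Set.ofList T) := by
      rw [hnodes, hk, PySem.Set.ofList_eq_self_of_nodup _ (PySem.Set.nodup_ofList T)]
    rw [hF, pv_keys_foldl_setdefault, hk, hnn]
    exact pv_keys_order K T
  have hFget : ∀ c, F.getD c [] = (E.filter (fun e => e.2 == c)).map (fun e => e.1) := by
    intro c; rw [hF, pv_getD_foldl_setdefault, hg]
  have hnd : F.keys.Nodup := by rw [hFkeys]; exact PySem.Set.nodup_ofList _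
  rw [PySem.Dict.items_eq_map_keys F hnd [], hFkeys, List.map_map,
    PySem.List.dedup_eq_ofList]
  apply List.map_congr_left
  intro k _
  simp [hFget k, List.map_id']
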